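-- pv_equiv track=rewrite | github.com/joanvelja/prime-rl | src/prime_rl/trainer/sft/data.py | _split_sequence_lengths
-- ===== SOURCE A (Python) =====
-- def _split_sequence_lengths(sequence_lengths: list[int], cutoff: int) -> tuple[list[int], list[int]]:
--     emitted, carry = [], []
--     remaining = cutoff
--     for idx, length in enumerate(sequence_lengths):
--         if remaining >= length:
--             emitted.append(length)
--             remaining -= length
--             continue
--         if remaining > 0:
--             emitted.append(remaining)
--         tail = length - remaining
--         if tail > 0:
--             carry.append(tail)
--         carry.extend(sequence_lengths[idx + 1 :])
--         break
--     return emitted, carry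
-- ===== SOURCE B (Python) =====
-- from itertools import accumulate
--
-- def _split_sequence_lengths(sequence_lengths: list[int], cutoff: int) -> tuple[list[int], list[int]]:
--     prefix = list(accumulate(sequence_lengths))
--     idx = next((i for i, total in enumerate(prefix) if total > cutoff), None)
--     if idx is None:
--         return list(sequence_lengths), []
--     before = prefix[idx - 1] if idx else 0
--     partial = cutoff - before
--     emitted = sequence_lengths[:idx] + ([partial] if partial > 0 else [])
--     carry = [prefix[idx] - cutoff] + sequence_lengths[idx + 1:]
--     return emitted, carry
-- ===== Notes on version B (the rewrite author's own statement) =====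
-- stated objective: alternative
-- what changed: Replaces the stateful loop (running remainder, break, in-loop list building) with a declarative pipeline: itertools.accumulate prefix totals, find the first index whose total exceeds the cutoff, then build emitted/carry by slicing and arithmetic on the prefix totals.
import Mathlib
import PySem

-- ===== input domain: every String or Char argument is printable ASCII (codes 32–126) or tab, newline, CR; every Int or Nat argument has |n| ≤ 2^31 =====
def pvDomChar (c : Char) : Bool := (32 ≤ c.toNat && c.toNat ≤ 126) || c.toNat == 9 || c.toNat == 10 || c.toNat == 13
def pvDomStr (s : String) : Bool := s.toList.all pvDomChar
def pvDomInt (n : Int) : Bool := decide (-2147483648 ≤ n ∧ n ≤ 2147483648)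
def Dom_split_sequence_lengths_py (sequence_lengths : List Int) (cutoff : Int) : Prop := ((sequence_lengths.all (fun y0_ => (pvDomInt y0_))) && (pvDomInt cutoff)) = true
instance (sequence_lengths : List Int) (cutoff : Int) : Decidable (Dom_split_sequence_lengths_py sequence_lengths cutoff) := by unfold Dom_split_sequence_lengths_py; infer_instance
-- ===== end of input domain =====

-- B replaces A's running-remainder loop with prefix totals + first index exceeding the cutoff + slicing (alternative decomposition, same cost).

-- ===== PORT A =====
-- Literal transliteration of A: loop with `remaining`, break at the first element that overflows.
def split_sequence_lengths_py : List Int → Int → List Int × List Int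
  | [], _ => ([], [])
  | length :: rest, remaining =>
    if remaining ≥ length then
      let p := split_sequence_lengths_py rest (remaining - length)
      (length :: p.1, p.2)
    else
      ((if remaining > 0 then [remaining] else []),
       (if length - remaining > 0 then [length - remaining] else []) ++ rest)

-- ===== PORT B =====
-- itertools.accumulate: running totals
def pvAccum (acc : Int) : List Int → List Int
  | [] => []
  | x :: rest => (acc + x) :: pvAccum (acc + x) rest

-- Transliteration of B: prefix totals, first index whose total exceeds cutoff, then two slices.
def split_sequence_lengths_py_alt (sequence_lengths : List Int) (cutoff : Int) : List Int × List Int :=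
  let pre := pvAccum 0 sequence_lengths
  match pre.findIdx? (fun total => cutoff < total) with
  | none => (sequence_lengths, [])
  | some idx =>
    let before := if idx = 0 then 0 else pre.getD (idx - 1) 0
    let part := cutoff - before
    let emitted := sequence_lengths.take idx ++ (if 0 < part then [part] else [])
    let carry := (pre.getD idx 0 - cutoff) :: sequence_lengths.drop (idx + 1)
    (emitted, carry)

-- ===== PRECONDITION & SPEC =====
def Spec_split_sequence_lengths_py (sequence_lengths : List Int) (cutoff : Int) (out : List Int × List Int) : Prop := out = split_sequence_lengths_py_alt sequence_lengths cutoff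
instance (sequence_lengths : List Int) (cutoff : Int) (out : List Int × List Int) : Decidable (Spec_split_sequence_lengths_py sequence_lengths cutoff out) := by unfold Spec_split_sequence_lengths_py; infer_instance

-- ===== CLAIM (what is proved, stated in full; the proofs are below) =====
def Claim_equal_split_sequence_lengths_py : Prop := ∀ (sequence_lengths : List Int) (cutoff : Int), Dom_split_sequence_lengths_py sequence_lengths cutoff → Spec_split_sequence_lengths_py sequence_lengths cutoff (split_sequence_lengths_py sequence_lengths cutoff)

-- ===== LEMMAS AND PROOFS =====

theorem pvAccum_length (a : Int) (xs : List Int) : (pvAccum a xs).length = xs.length := by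
  induction xs generalizing a with
  | nil => rfl
  | cons x r ih => simp [pvAccum, ih]

theorem pvAccum_shift (a : Int) (xs : List Int) :
    pvAccum a xs = (pvAccum 0 xs).map (a + ·) := by
  induction xs generalizing a with
  | nil => rfl
  | cons x r ih =>
    simp only [pvAccum, zero_add, ih (a + x), ih x, List.map_map, List.map_cons, List.cons.injEq]
    exact ⟨trivial, List.map_congr_left (fun t _ => by simp [Function.comp, add_assoc])⟩

theorem split_eq (xs : List Int) (c : Int) :
    split_sequence_lengths_py xs c = split_sequence_lengths_py_alt xs c := by
  induction xs generalizing c with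
  | nil => rfl
  | cons x r ih =>
    by_cases hx : c < x
    · have hng : ¬ (c ≥ x) := by omega
      simp [split_sequence_lengths_py, split_sequence_lengths_py_alt, pvAccum,
        List.findIdx?_cons,
        hx]
    · have hge : c ≥ x := by omega
      have hpred : (fun t : Int => decide (c < x + t)) = (fun t : Int => decide (c - x < t)) := by
        funext t; simp [decide_eq_decide]; omega
      have hfind : List.findIdx? (fun total => decide (c < total)) (pvAccum x r)
          = List.findIdx? (fun total => decide (c - x < total)) (pvAccum 0 r) := by
        rw [pvAccum_shift x r, List.findIdx?_map]
        have : ((fun total : Int => decide (c < total)) ∘ (x + ·))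
            = (fun t : Int => decide (c - x < t)) := by
          funext t; simp [Function.comp, decide_eq_decide]; omega
        rw [this]
      have hA : split_sequence_lengths_py (x :: r) c
          = (x :: (split_sequence_lengths_py r (c - x)).1, (split_sequence_lengths_py r (c - x)).2) := by
        simp [split_sequence_lengths_py, hge]
      rw [hA, ih]
      show _ = split_sequence_lengths_py_alt (x :: r) c
      unfold split_sequence_lengths_py_alt
      simp only [pvAccum, zero_add, List.findIdx?_cons, hx, decide_eq_true_eq, hfind]
      cases hj : List.findIdx? (fun total => decide (c - x < total)) (pvAccum 0 r) with
      | none => simp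
      | some j =>
        have hjlt : j < r.length := by
          have := List.findIdx?_eq_some_iff_findIdx_eq.mp hj
          simpa [pvAccum_length] using this.1
        simp only [Option.map_some]
        have hshift : pvAccum x r = (pvAccum 0 r).map (x + ·) := pvAccum_shift x r
        cases j with
        | zero =>
          have hL : 0 < (pvAccum 0 r).length := by rw [pvAccum_length]; omega
          simp only [hshift]
          simp [List.getElem?_map, List.getElem?_eq_getElem hL]
          omega
        | succ k =>
          have hklt : k < (pvAccum 0 r).length := by rw [pvAccum_length]; omega
          have hk1lt : k + 1 < (pvAccum 0 r).length := by rw [pvAccum_length]; omega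
          simp only [hshift]
          simp [List.getElem?_map, List.getElem?_eq_getElem hklt,
            List.getElem?_eq_getElem hk1lt, List.take_succ_cons]
          refine ⟨?_, by omega⟩
          by_cases h : (pvAccum 0 r)[k] < c - x
          · rw [if_pos h, if_pos (by omega)]
            simp only [List.cons.injEq, and_true]
            omega
          · rw [if_neg h, if_neg (by omega)]

-- ===== VERDICT (by name: the statement is the Claim_ definition above) =====
theorem split_sequence_lengths_py_spec : Claim_equal_split_sequence_lengths_py := by
  intro xs c _
  unfold Spec_split_sequence_lengths_py
  exact split_eq xs c
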